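-- pv_equiv track=rewrite | github.com/ZeroxTM/GeneticMapping | classes/Linkage.py | get_shared_alleles
-- ===== SOURCE A (Python) =====
-- def get_shared_alleles(marker1_alleles, marker2_alleles):
--     n00, n01, n10, n11 = 0, 0, 0, 0
--     if len(marker1_alleles) != 0:
--         marker1_alleles = marker1_alleles[0]
--     else:
--         return 'N/A'
--     if len(marker2_alleles) != 0:
--         marker2_alleles = marker2_alleles[0]
--     else:
--         return 'N/A'
--
--     for i in range(0, len(marker1_alleles)):
--         if marker1_alleles[i] == '0' and marker2_alleles[i] == '0':
--             n00 += 1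
--         elif marker1_alleles[i] == '1' and marker2_alleles[i] == '1':
--             n11 += 1
--         elif marker1_alleles[i] == '0' and marker2_alleles[i] == '1':
--             n01 += 1
--         elif marker1_alleles[i] == '1' and marker2_alleles[i] == '0':
--             n10 += 1
--     return [n00, n01, n10, n11]
-- ===== SOURCE B (Python) =====
-- def get_shared_alleles(marker1_alleles, marker2_alleles):
--     if len(marker1_alleles) == 0 or len(marker2_alleles) == 0:
--         return 'N/A'
--     m1, m2 = marker1_alleles[0], marker2_alleles[0]
--     pairs = [(m1[i], m2[i]) for i in range(len(m1))]
--     return [pairs.count(k) for k in [('0', '0'), ('0', '1'), ('1', '0'), ('1', '1')]]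
-- ===== Notes on version B (the rewrite author's own statement) =====
-- stated objective: simpler
-- what changed: Replaces the four-counter if/elif chain inside an index loop by building the list of aligned character pairs once and returning the .count of each of the four keys; non-0/1 characters fall out naturally instead of being skipped by branches.
-- outside the precondition, e.g. on get_shared_alleles([], ['01']): A returns 'N/A', B returns 'N/A'; on get_shared_alleles(['1 ab c'], ['0']): A returns [0, 0, 1, 0], B raises IndexError
import Mathlib
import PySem

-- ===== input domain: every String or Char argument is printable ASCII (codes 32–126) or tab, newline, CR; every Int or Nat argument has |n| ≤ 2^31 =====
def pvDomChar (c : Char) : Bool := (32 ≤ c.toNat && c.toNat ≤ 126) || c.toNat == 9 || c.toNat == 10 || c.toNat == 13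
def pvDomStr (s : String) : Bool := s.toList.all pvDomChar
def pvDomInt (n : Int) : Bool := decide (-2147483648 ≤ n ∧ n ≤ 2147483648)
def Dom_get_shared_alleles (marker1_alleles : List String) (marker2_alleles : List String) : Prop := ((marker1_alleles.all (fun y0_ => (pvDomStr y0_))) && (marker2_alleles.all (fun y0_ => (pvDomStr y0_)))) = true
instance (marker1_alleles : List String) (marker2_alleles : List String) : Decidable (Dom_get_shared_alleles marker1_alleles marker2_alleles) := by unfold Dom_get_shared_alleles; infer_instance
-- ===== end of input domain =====

-- B is a simpler re-decomposition: build the aligned pair list once, return the count of each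
-- of the four keys (same values as A's four-counter branch loop); equivalence is about the
-- return value on Pre_ (where A returns a list of ints).

-- ===== PORT A =====
-- On an empty marker list A returns the string 'N/A' (not a List Int): outside Pre_, [] stands in.
-- Indexing s2 is in range under Pre_ (IndexError excluded by Pre_), so getD ' ' is exact there.
def get_shared_alleles (marker1_alleles : List String) (marker2_alleles : List String) : List Int :=
  if marker1_alleles.length = 0 then [] else
  if marker2_alleles.length = 0 then [] else
  let s1 := (marker1_alleles.headD "").toList
  let s2 := (marker2_alleles.headD "").toList
  let st := (List.range s1.length).foldl (fun (st : Int × Int × Int × Int) i =>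
      let c1 := s1.getD i ' '
      let c2 := s2.getD i ' '
      if c1 = '0' ∧ c2 = '0' then (st.1 + 1, st.2.1, st.2.2.1, st.2.2.2)
      else if c1 = '1' ∧ c2 = '1' then (st.1, st.2.1, st.2.2.1, st.2.2.2 + 1)
      else if c1 = '0' ∧ c2 = '1' then (st.1, st.2.1 + 1, st.2.2.1, st.2.2.2)
      else if c1 = '1' ∧ c2 = '0' then (st.1, st.2.1, st.2.2.1 + 1, st.2.2.2)
      else st) (0, 0, 0, 0)
  [st.1, st.2.1, st.2.2.1, st.2.2.2]

-- ===== PORT B =====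
-- Same guard remark as in port A: 'N/A' (outside Pre_) is represented by [].
def get_shared_alleles_alt (marker1_alleles : List String) (marker2_alleles : List String) : List Int :=
  if marker1_alleles.length = 0 ∨ marker2_alleles.length = 0 then [] else
  let s1 := (marker1_alleles.headD "").toList
  let s2 := (marker2_alleles.headD "").toList
  let pairs := (List.range s1.length).map (fun i => (s1.getD i ' ', s2.getD i ' '))
  [(('0' : Char), ('0' : Char)), ('0', '1'), ('1', '0'), ('1', '1')].map
    (fun k => PySem.List.count pairs k)

-- ===== PRECONDITION & SPEC =====
-- Pre_ excludes an empty marker list (A returns the string 'N/A', not a list of ints) and a first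
-- string of marker2 shorter than that of marker1: there A raises IndexError, except that its
-- short-circuit skips indexing marker2 at non-0/1 positions and so may still return where B,
-- which always indexes, raises.
def Pre_get_shared_alleles (marker1_alleles : List String) (marker2_alleles : List String) : Prop :=
  marker1_alleles ≠ [] ∧ marker2_alleles ≠ [] ∧
  (marker1_alleles.headD "").toList.length ≤ (marker2_alleles.headD "").toList.length
instance (marker1_alleles : List String) (marker2_alleles : List String) : Decidable (Pre_get_shared_alleles marker1_alleles marker2_alleles) := by unfold Pre_get_shared_alleles; infer_instance

def pvWitness_get_shared_alleles : List String × List String := (["0110x"], ["10110"])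

def Spec_get_shared_alleles (marker1_alleles : List String) (marker2_alleles : List String) (out : List Int) : Prop := out = get_shared_alleles_alt marker1_alleles marker2_alleles
instance (marker1_alleles : List String) (marker2_alleles : List String) (out : List Int) : Decidable (Spec_get_shared_alleles marker1_alleles marker2_alleles out) := by unfold Spec_get_shared_alleles; infer_instance

-- ===== CLAIM (what is proved, stated in full; the proofs are below) =====
def Claim_equal_get_shared_alleles : Prop := ∀ (marker1_alleles : List String) (marker2_alleles : List String), Dom_get_shared_alleles marker1_alleles marker2_alleles → Pre_get_shared_alleles marker1_alleles marker2_alleles → Spec_get_shared_alleles marker1_alleles marker2_alleles (get_shared_alleles marker1_alleles marker2_alleles)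

-- ===== LEMMAS AND PROOFS =====

-- A's loop body as a function of the aligned character pair
def pvStep (st : Int × Int × Int × Int) (p : Char × Char) : Int × Int × Int × Int :=
  if p.1 = '0' ∧ p.2 = '0' then (st.1 + 1, st.2.1, st.2.2.1, st.2.2.2)
  else if p.1 = '1' ∧ p.2 = '1' then (st.1, st.2.1, st.2.2.1, st.2.2.2 + 1)
  else if p.1 = '0' ∧ p.2 = '1' then (st.1, st.2.1 + 1, st.2.2.1, st.2.2.2)
  else if p.1 = '1' ∧ p.2 = '0' then (st.1, st.2.1, st.2.2.1 + 1, st.2.2.2)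
  else st

theorem foldl_pvStep (ps : List (Char × Char)) (a b c d : Int) :
    ps.foldl pvStep (a, b, c, d) =
      (a + ps.count ('0', '0'), b + ps.count ('0', '1'),
       c + ps.count ('1', '0'), d + ps.count ('1', '1')) := by
  induction ps generalizing a b c d with
  | nil => simp
  | cons p ps ih =>
    obtain ⟨c1, c2⟩ := p
    rw [List.foldl_cons]
    simp only [pvStep]
    split_ifs with h1 h2 h3 h4
    · obtain ⟨rfl, rfl⟩ := h1
      rw [ih]; simp only [List.count_cons, Prod.ext_iff]; norm_num; omega
    · obtain ⟨rfl, rfl⟩ := h2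
      rw [ih]; simp only [List.count_cons, Prod.ext_iff]; norm_num; omega
    · obtain ⟨rfl, rfl⟩ := h3
      rw [ih]; simp only [List.count_cons, Prod.ext_iff]; norm_num; omega
    · obtain ⟨rfl, rfl⟩ := h4
      rw [ih]; simp only [List.count_cons, Prod.ext_iff]; norm_num; omega
    · rw [ih]
      simp [Prod.mk.injEq, h1, h2, h3, h4]

-- ===== VERDICT (by name: the statement is the Claim_ definition above) =====
theorem get_shared_alleles_spec : Claim_equal_get_shared_alleles := by
  intro m1 m2 _ hpre
  obtain ⟨h1, h2, _⟩ := hpre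
  unfold Spec_get_shared_alleles get_shared_alleles get_shared_alleles_alt
  have l1 : m1.length ≠ 0 := by simpa using h1
  have l2 : m2.length ≠ 0 := by simpa using h2
  simp only [l1, l2, or_self, ite_false]
  set s1 := (m1.headD "").toList
  set s2 := (m2.headD "").toList
  have hmap : ((List.range s1.length).map (fun i => (s1.getD i ' ', s2.getD i ' '))).foldl
      pvStep ((0 : Int), (0 : Int), (0 : Int), (0 : Int)) =
      (List.range s1.length).foldl (fun (st : Int × Int × Int × Int) i =>
        let c1 := s1.getD i ' '
        let c2 := s2.getD i ' '
        if c1 = '0' ∧ c2 = '0' then (st.1 + 1, st.2.1, st.2.2.1, st.2.2.2)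
        else if c1 = '1' ∧ c2 = '1' then (st.1, st.2.1, st.2.2.1, st.2.2.2 + 1)
        else if c1 = '0' ∧ c2 = '1' then (st.1, st.2.1 + 1, st.2.2.1, st.2.2.2)
        else if c1 = '1' ∧ c2 = '0' then (st.1, st.2.1, st.2.2.1 + 1, st.2.2.2)
        else st) (0, 0, 0, 0) := by
    rw [List.foldl_map]; rfl
  rw [← hmap, foldl_pvStep]
  simp [PySem.List.count_eq]
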